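-- pv_equiv track=rewrite | github.com/Deekshith76/Dynamic-Programs | gridTraveller - memoization.py | gridT
-- ===== SOURCE A (Python) =====
-- def gridT(m, n, memo = dict()):
--
--     key =  f"{m},{n}" #key = 3,4
--     if key in memo:
--         return memo[key]
--     if m==0 or n==0:
--         return 0
--     if m==1 and n==1:
--         return 1
--     memo[key] = gridT(m-1,n,memo) + gridT(m, n-1, memo)
--     return memo[key]
-- ===== SOURCE B (Python) =====
-- def gridT(m, n, memo = dict()):
--     # closed form: number of lattice paths = C(m+n-2, min(m,n)-1); memo is A's
--     # internal cache, unused here (equivalence claimed for unseeded caches)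
--     if m <= 0 or n <= 0:
--         return 0
--     k = min(m, n) - 1
--     N = m + n - 2
--     r = 1
--     for i in range(1, k + 1):
--         r = r * (N - k + i) // i
--     return r
-- ===== Notes on version B (the rewrite author's own statement) =====
-- stated objective: faster
-- what changed: Replaces the memoized two-way recursion over all (i,j) cells with the closed-form binomial coefficient C(m+n-2, min(m,n)-1) computed by a single exact multiplicative product loop (O(min(m,n)) vs O(m*n)); B ignores the internal cache argument (and does not mutate it), so Pre_ excludes negative m or n (A's recursion never reaches a base case and raises RecursionError), grids with recursion depth m+n beyond CPython's default recursion limit of 1000 (A raises RecursionError there in its home configuration; …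
-- outside the precondition, e.g. on gridT(2, 2, {'2,2': 99}): A returns 99, B returns 2; on gridT(3, 3, {'2,2': 99}): A returns 200, B returns 6; on gridT(996, 5, {}): A returns 41251456251, B returns 41251456251
import Mathlib
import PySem

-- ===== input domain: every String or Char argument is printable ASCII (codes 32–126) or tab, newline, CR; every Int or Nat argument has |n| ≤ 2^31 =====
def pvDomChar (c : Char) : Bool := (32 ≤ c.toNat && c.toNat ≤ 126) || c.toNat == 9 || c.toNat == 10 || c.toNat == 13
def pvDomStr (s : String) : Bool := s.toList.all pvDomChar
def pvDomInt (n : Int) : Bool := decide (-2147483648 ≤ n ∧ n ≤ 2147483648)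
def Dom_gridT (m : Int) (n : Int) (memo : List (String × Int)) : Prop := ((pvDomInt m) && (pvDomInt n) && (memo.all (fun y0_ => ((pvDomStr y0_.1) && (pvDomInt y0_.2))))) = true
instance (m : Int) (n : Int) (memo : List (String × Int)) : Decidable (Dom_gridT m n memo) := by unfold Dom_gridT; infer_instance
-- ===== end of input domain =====

-- B replaces A's memoized recursion by the closed-form binomial C(m+n-2, min(m,n)-1); the
-- equivalence is about the RETURN value only — A mutates its memo argument in place, B does not.

-- ===== PORT A =====
-- key = f"{m},{n}"
def pyKey (m n : Int) : String := PySem.Int.toStr m ++ "," ++ PySem.Int.toStr n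

-- the recursion of A, threading the mutable dict; the fuel only makes the Python recursion
-- (which terminates on every input admitted by Pre_) total, it is never exhausted under Pre_
def gridTGo : Nat → Int → Int → PySem.Dict String Int → Int × PySem.Dict String Int
  | 0, _, _, memo => (0, memo)
  | fuel+1, m, n, memo =>
    let key := pyKey m n
    match memo.get? key with
    | some v => (v, memo)                       -- if key in memo: return memo[key]
    | none =>
      if m = 0 ∨ n = 0 then (0, memo)
      else if m = 1 ∧ n = 1 then (1, memo)
      else
        let r1 := gridTGo fuel (m-1) n memo     -- gridT(m-1, n, memo)
        let r2 := gridTGo fuel m (n-1) r1.2     -- gridT(m, n-1, memo)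
        let memo' := r2.2.insert key (r1.1 + r2.1)  -- memo[key] = ...
        (((memo'.get? key).getD 0), memo')      -- return memo[key] (always present here)

def gridT (m : Int) (n : Int) (memo : List (String × Int)) : Int :=
  (gridTGo (min (m.toNat + n.toNat + 1) 1000) m n (PySem.Dict.mk memo)).1

-- ===== PORT B =====
def gridT_alt (m : Int) (n : Int) (memo : List (String × Int)) : Int :=
  if m ≤ 0 ∨ n ≤ 0 then 0
  else
    let k := min m n - 1
    let N := m + n - 2
    (PySem.List.pyRange 1 (k+1)).foldl (fun r i => PySem.Int.floordiv (r * (N - k + i)) i) 1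

-- ===== PRECONDITION & SPEC =====
-- decimal value of a digit string
def keyVal (cs : List Char) : Nat := cs.foldl (fun a c => 10*a + (c.toNat - 48)) 0
-- cs is exactly str(i) for the natural number i = keyVal cs
def isCanonNat (cs : List Char) : Bool :=
  cs.all Char.isDigit && !cs.isEmpty && (Nat.toDigits 10 (keyVal cs) == cs)
-- split at the first comma
def splitComma : List Char → Option (List Char × List Char)
  | [] => none
  | c :: cs => if c = ',' then some ([], cs) else (splitComma cs).map (fun p => (c :: p.1, p.2))
-- s is "i,j" for naturals i ≤ m, j ≤ n, i.e. a cache key A's recursion from (m, n) could consult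
def isGridKey (m n : Int) (s : String) : Bool :=
  match splitComma s.toList with
  | some (a, b) => isCanonNat a && isCanonNat b && decide ((keyVal a : Int) ≤ m ∧ (keyVal b : Int) ≤ n)
  | none => false

-- Pre_ excludes (i) negative m or n, where A's recursion never reaches a base case and raises
-- RecursionError, (ii) grids whose recursion depth m+n exceeds CPython's default recursion
-- limit of 1000 (unless a side is 0, where A answers without recursing): there A raises
-- RecursionError in its home configuration — under a raised limit A returns the same binomial
-- count, which B returns too, so the exclusion narrows Pre_ below what a raised-limit run of A
-- accepts — and (iii) memos pre-seeded with a reachable cache key "i,j" (0 ≤ i ≤ m, 0 ≤ j ≤ n),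
-- where A echoes the seeded value back — a cache artefact — while B ignores the cache.
def Pre_gridT (m : Int) (n : Int) (memo : List (String × Int)) : Prop :=
  0 ≤ m ∧ 0 ≤ n ∧ (m = 0 ∨ n = 0 ∨ m + n ≤ 997) ∧ ∀ p ∈ memo, isGridKey m n p.1 = false
instance (m : Int) (n : Int) (memo : List (String × Int)) : Decidable (Pre_gridT m n memo) := by
  unfold Pre_gridT; infer_instance

def pvWitness_gridT : Int × Int × (List (String × Int)) := (3, 4, [("x,y", 7), ("hello", -2)])

def Spec_gridT (m : Int) (n : Int) (memo : List (String × Int)) (out : Int) : Prop := out = gridT_alt m n memo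
instance (m : Int) (n : Int) (memo : List (String × Int)) (out : Int) : Decidable (Spec_gridT m n memo out) := by unfold Spec_gridT; infer_instance

-- ===== CLAIM (what is proved, stated in full; the proofs are below) =====
def Claim_equal_gridT : Prop := ∀ (m : Int) (n : Int) (memo : List (String × Int)), Dom_gridT m n memo → Pre_gridT m n memo → Spec_gridT m n memo (gridT m n memo)

-- ===== LEMMAS AND PROOFS =====

-- the number of grid-traveller paths: 0 on an empty grid, else C(i+j-2, i-1)
def paths (i j : Nat) : Int := if i = 0 ∨ j = 0 then 0 else ((i+j-2).choose (i-1) : Int)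

lemma digitChar_isDigit (k : Nat) (h : k < 10) : (Nat.digitChar k).isDigit = true := by
  interval_cases k <;> decide

lemma digitChar_val (k : Nat) (h : k < 10) : (Nat.digitChar k).toNat - 48 = k := by
  interval_cases k <;> decide

lemma toDigitsCore_append (f : Nat) : ∀ (n : Nat) (a : List Char),
    Nat.toDigitsCore 10 f n a = Nat.toDigitsCore 10 f n [] ++ a := by
  induction f with
  | zero => intro n a; simp [Nat.toDigitsCore]
  | succ f ih =>
    intro n a
    simp only [Nat.toDigitsCore]
    by_cases h : n / 10 = 0
    · simp [h]
    · simp only [h, if_false]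
      rw [ih (n / 10) (_ :: a), ih (n / 10) (_ :: [])]
      simp

lemma keyVal_append_singleton (l : List Char) (d : Char) :
    keyVal (l ++ [d]) = 10 * keyVal l + (d.toNat - 48) := by
  simp [keyVal, List.foldl_append]

lemma keyVal_toDigitsCore (f : Nat) : ∀ n : Nat, n < 10 ^ f →
    keyVal (Nat.toDigitsCore 10 f n []) = n := by
  induction f with
  | zero => intro n h; interval_cases n; simp [Nat.toDigitsCore, keyVal]
  | succ f ih =>
    intro n h
    simp only [Nat.toDigitsCore]
    by_cases h0 : n / 10 = 0
    · have hn : n < 10 := by omega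
      simp [h0, keyVal, Nat.mod_eq_of_lt hn, digitChar_val n hn]
    · simp only [h0, if_false]
      rw [toDigitsCore_append, keyVal_append_singleton]
      have hf : 0 < f := by
        by_contra hf
        have : f = 0 := by omega
        subst this; simp [pow_succ] at h; omega
      have : n / 10 < 10 ^ f := by
        rw [Nat.div_lt_iff_lt_mul (by norm_num)]
        calc n < 10 ^ (f + 1) := h
        _ = 10 ^ f * 10 := by ring
      rw [ih (n / 10) this, digitChar_val (n % 10) (by omega)]
      omega

lemma toDigitsCore_all_isDigit (f : Nat) : ∀ (n : Nat) (a : List Char),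
    (∀ c ∈ a, c.isDigit = true) → ∀ c ∈ Nat.toDigitsCore 10 f n a, c.isDigit = true := by
  induction f with
  | zero => intro n a ha; simpa [Nat.toDigitsCore] using ha
  | succ f ih =>
    intro n a ha
    simp only [Nat.toDigitsCore]
    by_cases h0 : n / 10 = 0
    · simp only [h0, if_true]
      intro c hc
      rw [List.mem_cons] at hc
      rcases hc with rfl | hc
      · exact digitChar_isDigit _ (by omega)
      · exact ha c hc
    · simp only [h0, if_false]
      refine ih (n / 10) _ ?_
      intro c hc
      rw [List.mem_cons] at hc
      rcases hc with rfl | hc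
      · exact digitChar_isDigit _ (by omega)
      · exact ha c hc

lemma toDigits_all_isDigit (n : Nat) : ∀ c ∈ Nat.toDigits 10 n, c.isDigit = true :=
  toDigitsCore_all_isDigit (n+1) n [] (by simp)

lemma toDigits_ne_nil (n : Nat) : Nat.toDigits 10 n ≠ [] := by
  show Nat.toDigitsCore 10 (n+1) n [] ≠ []
  simp only [Nat.toDigitsCore]
  by_cases h0 : n / 10 = 0
  · simp [h0]
  · simp only [h0, if_false]
    rw [toDigitsCore_append]
    simp

lemma keyVal_toDigits (n : Nat) : keyVal (Nat.toDigits 10 n) = n := by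
  refine keyVal_toDigitsCore (n+1) n ?_
  calc n < 10 ^ n := Nat.lt_pow_self (by norm_num)
  _ ≤ 10 ^ (n+1) := Nat.pow_le_pow_right (by norm_num) (by omega)

lemma isCanonNat_toDigits (n : Nat) : isCanonNat (Nat.toDigits 10 n) = true := by
  simp [isCanonNat, keyVal_toDigits, toDigits_ne_nil]
  exact toDigits_all_isDigit n

lemma toChars_natCast (i : Nat) : PySem.Int.toChars (i : Int) = Nat.toDigits 10 i := by
  simp [PySem.Int.toChars]

lemma key_toList (x y : Int) :
    (pyKey x y).toList = PySem.Int.toChars x ++ ',' :: PySem.Int.toChars y := by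
  simp [pyKey, String.toList_append, PySem.Int.toList_toStr]

lemma comma_not_mem_toDigits (n : Nat) : ',' ∉ Nat.toDigits 10 n := by
  intro h
  have := toDigits_all_isDigit n ',' h
  simp [Char.isDigit] at this

lemma splitComma_append (a b : List Char) (h : ',' ∉ a) :
    splitComma (a ++ ',' :: b) = some (a, b) := by
  induction a with
  | nil => simp [splitComma]
  | cons c cs ih =>
    have hc : c ≠ ',' := by intro hc; exact h (by simp [hc])
    simp only [List.cons_append, splitComma, hc, if_false]
    rw [ih (by intro hm; exact h (by simp [hm]))]
    rfl

lemma splitComma_key (i j : Nat) :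
    splitComma ((pyKey ↑i ↑j).toList) = some (Nat.toDigits 10 i, Nat.toDigits 10 j) := by
  rw [key_toList, toChars_natCast, toChars_natCast]
  exact splitComma_append _ _ (comma_not_mem_toDigits i)

lemma key_inj (i j a b : Nat) (h : pyKey ↑i ↑j = pyKey ↑a ↑b) : i = a ∧ j = b := by
  have hl : splitComma ((pyKey ↑i ↑j).toList) = splitComma ((pyKey ↑a ↑b).toList) := by rw [h]
  rw [splitComma_key, splitComma_key] at hl
  have h1 : Nat.toDigits 10 i = Nat.toDigits 10 a := by
    have := congrArg (fun o => (o.map Prod.fst)) hl; simpa using this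
  have h2 : Nat.toDigits 10 j = Nat.toDigits 10 b := by
    have := congrArg (fun o => (o.map Prod.snd)) hl; simpa using this
  constructor
  · have := congrArg keyVal h1; rwa [keyVal_toDigits, keyVal_toDigits] at this
  · have := congrArg keyVal h2; rwa [keyVal_toDigits, keyVal_toDigits] at this

lemma isGridKey_key (m n : Int) (i j : Nat) (him : (i:Int) ≤ m) (hjn : (j:Int) ≤ n) :
    isGridKey m n (pyKey ↑i ↑j) = true := by
  simp [isGridKey, splitComma_key, isCanonNat_toDigits, keyVal_toDigits, him, hjn]

lemma get?_mk_some_mem (l : List (String × Int)) (s : String) (v : Int)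
    (h : (PySem.Dict.mk l).get? s = some v) : ∃ p ∈ l, p.1 = s := by
  induction l with
  | nil => simp [PySem.Dict.get?] at h
  | cons p rest ih =>
    rw [PySem.Dict.get?_mk_cons] at h
    by_cases hk : p.1 == s
    · exact ⟨p, by simp, by simpa using hk⟩
    · simp only [hk, if_false] at h
      obtain ⟨q, hq, hq1⟩ := ih h
      exact ⟨q, by simp [hq], hq1⟩

lemma paths_pascal (M N : Nat) (hM : 1 ≤ M) (hN : 1 ≤ N) (h11 : ¬(M = 1 ∧ N = 1)) :
    paths M N = paths (M-1) N + paths M (N-1) := by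
  rcases Nat.lt_or_ge M 2 with hM2 | hM2
  · have hM1 : M = 1 := by omega
    subst hM1
    have hN2 : 2 ≤ N := by omega
    obtain ⟨b, rfl⟩ : ∃ b, N = b + 2 := ⟨N - 2, by omega⟩
    simp [paths]
  · rcases Nat.lt_or_ge N 2 with hN2 | hN2
    · have hN1 : N = 1 := by omega
      subst hN1
      obtain ⟨a, rfl⟩ : ∃ a, M = a + 2 := ⟨M - 2, by omega⟩
      simp [paths, Nat.choose_self, Nat.add_sub_cancel]
    · obtain ⟨a, rfl⟩ : ∃ a, M = a + 2 := ⟨M - 2, by omega⟩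
      obtain ⟨b, rfl⟩ : ∃ b, N = b + 2 := ⟨N - 2, by omega⟩
      have h1 : paths (a+2) (b+2) = (((a+b+1)+1).choose (a+1) : Int) := by
        simp only [paths, if_neg (by omega : ¬(a+2 = 0 ∨ b+2 = 0))]
        have e : a+2+(b+2)-2 = (a+b+1)+1 := by omega
        have e' : a+2-1 = a+1 := by omega
        rw [e, e']
      have h2 : paths (a+2-1) (b+2) = ((a+b+1).choose a : Int) := by
        simp only [paths, if_neg (by omega : ¬(a+2-1 = 0 ∨ b+2 = 0))]
        have e : a+2-1+(b+2)-2 = a+b+1 := by omega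
        have e' : a+2-1-1 = a := by omega
        rw [e, e']
      have h3 : paths (a+2) (b+2-1) = ((a+b+1).choose (a+1) : Int) := by
        simp only [paths, if_neg (by omega : ¬(a+2 = 0 ∨ b+2-1 = 0))]
        have e : a+2+(b+2-1)-2 = a+b+1 := by omega
        have e' : a+2-1 = a+1 := by omega
        rw [e, e']
      rw [h1, h2, h3]
      exact_mod_cast congrArg (Nat.cast : Nat → Int) (Nat.choose_succ_succ (a+b+1) a)

lemma gridTGo_correct (fuel : Nat) : ∀ (M N : Nat) (d : PySem.Dict String Int),
    M + N < fuel →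
    (∀ i j : Nat, i ≤ M → j ≤ N → ∀ v, d.get? (pyKey ↑i ↑j) = some v → v = paths i j) →
    (gridTGo fuel ↑M ↑N d).1 = paths M N ∧
    (∀ i j : Nat, i ≤ M → j ≤ N → ∀ v, (gridTGo fuel ↑M ↑N d).2.get? (pyKey ↑i ↑j) = some v → v = paths i j) ∧
    (∀ i j : Nat, ∀ v, (gridTGo fuel ↑M ↑N d).2.get? (pyKey ↑i ↑j) = some v →
      d.get? (pyKey ↑i ↑j) = some v ∨ (i ≤ M ∧ j ≤ N)) := by
  induction fuel with
  | zero => intro M N d hf _; omega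
  | succ f ih =>
    intro M N d hf hgood
    rcases hk : d.get? (pyKey ↑M ↑N) with _ | v
    · -- cache miss
      by_cases h0 : (M:Int) = 0 ∨ (N:Int) = 0
      · have hE : gridTGo (f+1) ↑M ↑N d = (0, d) := by
          simp only [gridTGo]; rw [hk, if_pos h0]
        have h0' : M = 0 ∨ N = 0 := by
          rcases h0 with h0 | h0
          · exact Or.inl (by exact_mod_cast h0)
          · exact Or.inr (by exact_mod_cast h0)
        rw [hE]
        exact ⟨by simp [paths, h0'], hgood, fun i j v h => Or.inl h⟩
      · by_cases h1 : (M:Int) = 1 ∧ (N:Int) = 1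
        · have hE : gridTGo (f+1) ↑M ↑N d = (1, d) := by
            simp only [gridTGo]; rw [hk, if_neg h0, if_pos h1]
          have hM1 : M = 1 := by exact_mod_cast h1.1
          have hN1 : N = 1 := by exact_mod_cast h1.2
          rw [hE]
          exact ⟨by simp [paths, hM1, hN1], hgood, fun i j v h => Or.inl h⟩
        · -- recursive case
          have hM1 : 1 ≤ M := by
            rcases Nat.eq_zero_or_pos M with h | h
            · exact absurd (Or.inl (by exact_mod_cast congrArg (Nat.cast : Nat → Int) h)) h0
            · omega
          have hN1 : 1 ≤ N := by
            rcases Nat.eq_zero_or_pos N with h | h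
            · exact absurd (Or.inr (by exact_mod_cast congrArg (Nat.cast : Nat → Int) h)) h0
            · omega
          have h11 : ¬(M = 1 ∧ N = 1) := by
            intro ⟨ha, hb⟩; exact h1 ⟨by exact_mod_cast congrArg (Nat.cast : Nat → Int) ha,
              by exact_mod_cast congrArg (Nat.cast : Nat → Int) hb⟩
          have em : (M:Int) - 1 = ((M-1 : Nat) : Int) := by omega
          have en : (N:Int) - 1 = ((N-1 : Nat) : Int) := by omega
          obtain ⟨h1v, h1g, h1n⟩ := ih (M-1) N d (by omega)
            (fun i j hi hj => hgood i j (by omega) hj)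
          have hgood2 : ∀ i j : Nat, i ≤ M → j ≤ N-1 → ∀ v,
              (gridTGo f ↑(M-1) ↑N d).2.get? (pyKey ↑i ↑j) = some v → v = paths i j := by
            intro i j hi hj v hv
            rcases h1n i j v hv with hold | ⟨hi1, hj1⟩
            · exact hgood i j hi (by omega) v hold
            · exact h1g i j hi1 hj1 v hv
          obtain ⟨h2v, h2g, h2n⟩ := ih M (N-1) (gridTGo f ↑(M-1) ↑N d).2 (by omega) hgood2
          have hE : gridTGo (f+1) ↑M ↑N d =
              ((((gridTGo f ↑M ↑(N-1) (gridTGo f ↑(M-1) ↑N d).2).2.insert (pyKey ↑M ↑N)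
                  ((gridTGo f ↑(M-1) ↑N d).1 + (gridTGo f ↑M ↑(N-1) (gridTGo f ↑(M-1) ↑N d).2).1)).get?
                  (pyKey ↑M ↑N)).getD 0,
               (gridTGo f ↑M ↑(N-1) (gridTGo f ↑(M-1) ↑N d).2).2.insert (pyKey ↑M ↑N)
                  ((gridTGo f ↑(M-1) ↑N d).1 + (gridTGo f ↑M ↑(N-1) (gridTGo f ↑(M-1) ↑N d).2).1)) := by
            simp only [gridTGo]; rw [hk, if_neg h0, if_neg h1, em, en]
          set r1v := (gridTGo f ↑(M-1) ↑N d).1 with hr1v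
          set d1 := (gridTGo f ↑(M-1) ↑N d).2 with hd1
          set r2v := (gridTGo f ↑M ↑(N-1) d1).1 with hr2v
          set d2 := (gridTGo f ↑M ↑(N-1) d1).2 with hd2
          have hsum : r1v + r2v = paths M N := by
            rw [h1v, h2v, ← paths_pascal M N hM1 hN1 h11]
          rw [hE]
          refine ⟨?_, ?_, ?_⟩
          · simp only [PySem.Dict.get?_insert_self, Option.getD_some]
            exact hsum
          · intro i j hi hj v hv
            rw [PySem.Dict.get?_insert] at hv
            by_cases he : pyKey ↑i ↑j = pyKey ↑M ↑N
            · rw [if_pos he] at hv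
              obtain ⟨rfl, rfl⟩ := key_inj i j M N he
              rw [← Option.some_inj.mp hv]
              exact hsum.symm ▸ hsum
            · rw [if_neg he] at hv
              rcases h2n i j v hv with hold | ⟨hi2, hj2⟩
              · rcases h1n i j v hold with holdd | ⟨hi1, hj1⟩
                · exact hgood i j hi hj v holdd
                · exact h1g i j hi1 hj1 v hold
              · exact h2g i j hi2 hj2 v hv
          · intro i j v hv
            rw [PySem.Dict.get?_insert] at hv
            by_cases he : pyKey ↑i ↑j = pyKey ↑M ↑N
            · obtain ⟨rfl, rfl⟩ := key_inj i j M N he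
              exact Or.inr ⟨le_rfl, le_rfl⟩
            · rw [if_neg he] at hv
              rcases h2n i j v hv with hold | ⟨hi2, hj2⟩
              · rcases h1n i j v hold with holdd | ⟨hi1, hj1⟩
                · exact Or.inl holdd
                · exact Or.inr ⟨by omega, by omega⟩
              · exact Or.inr ⟨hi2, by omega⟩
    · -- cache hit
      have hE : gridTGo (f+1) ↑M ↑N d = (v, d) := by
        simp only [gridTGo]; rw [hk]
      rw [hE]
      exact ⟨hgood M N le_rfl le_rfl v hk, hgood, fun i j v h => Or.inl h⟩

lemma foldl_binom (Nn K : Nat) (hK : K ≤ Nn) : ∀ t : Nat, t ≤ K →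
    (PySem.List.pyRange 1 ((t:Int)+1)).foldl
      (fun r i => PySem.Int.floordiv (r * (((Nn:Int) - (K:Int)) + i)) i) 1
      = ((Nn - K + t).choose t : Int) := by
  intro t
  induction t with
  | zero =>
    intro _
    norm_num
  | succ t ih =>
    intro ht
    have h1 : (((t:Nat)+1:Nat):Int) + 1 = ((t:Int)+1) + 1 := by push_cast; ring
    rw [h1, PySem.List.pyRange_one_succ_right (by omega), List.foldl_append,
        ih (by omega)]
    simp only [List.foldl_cons, List.foldl_nil]
    have e1 : ((Nn:Int) - (K:Int)) + ((t:Int)+1) = ((Nn - K + t + 1 : Nat) : Int) := by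
      push_cast [Nat.cast_sub hK]; ring
    rw [e1]
    have e2 : ((Nn - K + t).choose t : Int) * ((Nn - K + t + 1 : Nat) : Int)
        = (((Nn - K + t + 1).choose (t+1) * (t+1) : Nat) : Int) := by
      have := Nat.add_one_mul_choose_eq (Nn - K + t) t
      push_cast at this
      push_cast
      linarith [this]
    rw [e2]
    have e3 : ((t:Int)+1) = ((t+1 : Nat) : Int) := by push_cast; ring
    rw [e3, PySem.Int.floordiv_natCast]
    rw [Nat.mul_div_cancel _ (by omega)]
    have e4 : Nn - K + t + 1 = Nn - K + (t + 1) := by omega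
    rw [e4]

lemma gridT_alt_eq (M N : Nat) (memo : List (String × Int)) :
    gridT_alt ↑M ↑N memo = paths M N := by
  by_cases h : M = 0 ∨ N = 0
  · have hc : (M:Int) ≤ 0 ∨ (N:Int) ≤ 0 := by rcases h with h | h <;> simp [h]
    simp [gridT_alt, hc, paths, h]
  · push_neg at h
    have hM : 1 ≤ M := by omega
    have hN : 1 ≤ N := by omega
    have hc : ¬((M:Int) ≤ 0 ∨ (N:Int) ≤ 0) := by
      push_neg; constructor <;> exact_mod_cast Nat.pos_of_ne_zero (by omega)
    simp only [gridT_alt, hc, if_false]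
    set K := min M N - 1 with hKdef
    set Nn := M + N - 2 with hNndef
    have hK : K ≤ Nn := by omega
    have ek : min (M:Int) (N:Int) - 1 = (K:Int) := by omega
    have eN : (M:Int) + (N:Int) - 2 = (Nn:Int) := by omega
    rw [ek, eN]
    rw [foldl_binom Nn K hK K le_rfl]
    have e : Nn - K + K = Nn := by omega
    rw [e]
    simp only [paths, if_neg (by omega : ¬(M = 0 ∨ N = 0))]
    rcases le_total M N with hMN | hMN
    · have e' : K = M - 1 := by omega
      rw [e']
    · have e' : K = N - 1 := by omega
      rw [e']
      have e2 : N - 1 = Nn - (M - 1) := by omega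
      rw [e2, Nat.choose_symm (by omega)]

-- ===== VERDICT (by name: the statement is the Claim_ definition above) =====
theorem gridT_spec : Claim_equal_gridT := by
  unfold Claim_equal_gridT
  intro m n memo _ hpre
  obtain ⟨hm, hn, hsz, hmemo⟩ := hpre
  obtain ⟨M, rfl⟩ := Int.eq_ofNat_of_zero_le hm
  obtain ⟨N, rfl⟩ := Int.eq_ofNat_of_zero_le hn
  unfold Spec_gridT gridT
  have hgood : ∀ i j : Nat, i ≤ M → j ≤ N → ∀ v,
      (PySem.Dict.mk memo).get? (pyKey ↑i ↑j) = some v → v = paths i j := by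
    intro i j hi hj v hget
    obtain ⟨p, hp, hp1⟩ := get?_mk_some_mem memo _ v hget
    have hfalse := hmemo p hp
    rw [hp1, isGridKey_key ↑M ↑N i j (by exact_mod_cast hi) (by exact_mod_cast hj)] at hfalse
    simp at hfalse
  rw [gridT_alt_eq]
  simp only [Int.toNat_natCast]
  by_cases hz : M = 0 ∨ N = 0
  · -- a side is 0: A answers from the first base case without recursing, whatever the fuel
    have hnone : (PySem.Dict.mk memo).get? (pyKey ↑M ↑N) = none := by
      rcases h : (PySem.Dict.mk memo).get? (pyKey ↑M ↑N) with _ | v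
      · rfl
      · obtain ⟨p, hp, hp1⟩ := get?_mk_some_mem memo _ v h
        have hfalse := hmemo p hp
        rw [hp1, isGridKey_key ↑M ↑N M N le_rfl le_rfl] at hfalse
        simp at hfalse
    obtain ⟨f, hf⟩ : ∃ f, min (M + N + 1) 1000 = f + 1 := ⟨min (M + N + 1) 1000 - 1, by omega⟩
    rw [hf]
    have hz' : (M:Int) = 0 ∨ (N:Int) = 0 := by
      rcases hz with hz | hz <;> [exact Or.inl (by exact_mod_cast congrArg (Nat.cast : Nat → Int) hz);
        exact Or.inr (by exact_mod_cast congrArg (Nat.cast : Nat → Int) hz)]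
    have hE : gridTGo (f+1) ↑M ↑N (PySem.Dict.mk memo) = (0, PySem.Dict.mk memo) := by
      simp only [gridTGo]; rw [hnone, if_pos hz']
    rw [hE]
    simp [paths, hz]
  · -- both sides positive: Pre_'s recursion-depth bound makes the fuel sufficient
    have hMN : M + N ≤ 997 := by
      rcases hsz with h | h | h
      · exact absurd (Or.inl (by exact_mod_cast h)) hz
      · exact absurd (Or.inr (by exact_mod_cast h)) hz
      · exact_mod_cast h
    have hfuel : M + N < min (M + N + 1) 1000 := by omega
    exact (gridTGo_correct (min (M + N + 1) 1000) M N (PySem.Dict.mk memo) hfuel hgood).1
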